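-- pv_equiv track=rewrite | github.com/strato-space/fast-agent | scripts/probe_service_tiers.py | _resolve_tiers
-- ===== SOURCE A (Python) =====
-- from typing import Literal
--
-- TierName = Literal["standard", "fast", "flex"]
--
-- DEFAULT_TIERS: tuple[TierName, ...] = ("standard", "fast", "flex")
--
-- def _resolve_tiers(values: list[str] | None) -> tuple[TierName, ...]:
--     if not values:
--         return DEFAULT_TIERS
--
--     resolved: list[TierName] = []
--     for value in values:
--         if value == "all":
--             for tier in DEFAULT_TIERS:
--                 if tier not in resolved:
--                     resolved.append(tier)
--             continue
--         tier = value
--         if tier not in resolved: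
--             resolved.append(tier)
--     return tuple(resolved)
-- ===== SOURCE B (Python) =====
-- # B: flatten via a comprehension, then deduplicate with a recursive filter-based
-- # nub (emit head, recurse on the tail with the head's duplicates filtered out) --
-- # no "seen" accumulator or membership test against the output at all (alternative).
-- from typing import Literal
--
-- TierName = Literal["standard", "fast", "flex"]
--
-- DEFAULT_TIERS: tuple[TierName, ...] = ("standard", "fast", "flex")
--
--
-- def _nub(xs: list[str]) -> list[str]:
--     if not xs:
--         return []
--     head = xs[0]
--     return [head] + _nub([y for y in xs[1:] if y != head])
--
--
-- def _resolve_tiers(values: list[str] | None) -> tuple[TierName, ...]: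
--     if not values:
--         return DEFAULT_TIERS
--     flat = [t for v in values for t in (DEFAULT_TIERS if v == "all" else (v,))]
--     return tuple(_nub(flat))
-- ===== Notes on version B (the rewrite author's own statement) =====
-- stated objective: alternative
-- what changed: Replaces A's single interleaved expand-and-dedup loop (inner 'not in resolved' scan against the growing output) by a comprehension flatten followed by a recursive filter-based nub that keeps no seen-set: it emits the head and recurses on the tail with the head's duplicates filtered out.
import Mathlib
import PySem

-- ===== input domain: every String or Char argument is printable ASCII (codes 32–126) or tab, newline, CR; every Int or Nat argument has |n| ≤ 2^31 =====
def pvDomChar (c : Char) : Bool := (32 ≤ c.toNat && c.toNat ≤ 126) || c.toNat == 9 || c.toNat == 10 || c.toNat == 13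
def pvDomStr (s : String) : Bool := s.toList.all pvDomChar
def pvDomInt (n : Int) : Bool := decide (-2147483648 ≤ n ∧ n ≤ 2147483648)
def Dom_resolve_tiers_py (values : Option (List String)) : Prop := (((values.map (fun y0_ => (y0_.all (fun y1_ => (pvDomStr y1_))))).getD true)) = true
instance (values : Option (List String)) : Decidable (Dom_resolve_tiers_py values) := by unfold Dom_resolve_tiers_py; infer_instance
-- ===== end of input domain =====

-- B flattens with a comprehension and deduplicates via a recursive filter-based nub
-- (emit head, recurse on the tail with the head's duplicates filtered out), instead of
-- A's interleaved expand-and-dedup loop with a membership scan (alternative).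

-- ===== PORT A =====
def pvDefaultTiers : List String := ["standard", "fast", "flex"]

-- literal port of A: one loop over values, appending each new element (or each new
-- default tier on "all") to `resolved` after an inline `not in resolved` test
def resolve_tiers_py (values : Option (List String)) : List String :=
  match values with
  | none => pvDefaultTiers
  | some vs =>
    if vs = [] then pvDefaultTiers
    else
      vs.foldl (fun resolved value =>
        if value = "all" then
          pvDefaultTiers.foldl (fun r tier => if tier ∈ r then r else r ++ [tier]) resolved
        else
          if value ∈ resolved then resolved else resolved ++ [value]) []

-- ===== PORT B =====
-- literal port of Source B's _nub: head, then nub of the tail with head's copies filtered out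
def pvNub : List String → List String
  | [] => []
  | head :: t => head :: pvNub (t.filter (fun y => y ≠ head))
termination_by xs => xs.length
decreasing_by
  calc (List.filter _ t.attach).unattach.length
      ≤ t.attach.unattach.length := by
        simp only [List.unattach, List.length_map]
        exact List.length_filter_le _ _
    _ = t.length := by simp
    _ < t.length + 1 := Nat.lt_succ_self _

-- literal port of B: comprehension flatten, then the recursive nub
def resolve_tiers_py_alt (values : Option (List String)) : List String :=
  match values with
  | none => pvDefaultTiers
  | some vs =>
    if vs = [] then pvDefaultTiers
    else
      pvNub (vs.flatMap (fun v => if v = "all" then pvDefaultTiers else [v]))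

-- ===== PRECONDITION & SPEC =====
def Spec_resolve_tiers_py (values : Option (List String)) (out : List String) : Prop := out = resolve_tiers_py_alt values
instance (values : Option (List String)) (out : List String) : Decidable (Spec_resolve_tiers_py values out) := by unfold Spec_resolve_tiers_py; infer_instance

-- ===== CLAIM (what is proved, stated in full; the proofs are below) =====
def Claim_equal_resolve_tiers_py : Prop := ∀ (values : Option (List String)), Dom_resolve_tiers_py values → Spec_resolve_tiers_py values (resolve_tiers_py values)

-- ===== LEMMAS AND PROOFS =====

-- the per-value expansion B's comprehension concatenates
def pvExp (v : String) : List String := if v = "all" then pvDefaultTiers else [v]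

-- A's loop equals folding the membership-append step over the flat expansion
theorem pvLoopA_eq (vs : List String) (acc : List String) :
    vs.foldl (fun resolved value =>
        if value = "all" then
          pvDefaultTiers.foldl (fun r tier => if tier ∈ r then r else r ++ [tier]) resolved
        else
          if value ∈ resolved then resolved else resolved ++ [value]) acc
      = (vs.flatMap pvExp).foldl (fun r x => if x ∈ r then r else r ++ [x]) acc := by
  induction vs generalizing acc with
  | nil => rfl
  | cons v vs ih =>
      simp only [List.foldl_cons, List.flatMap_cons, List.foldl_append, ih]
      congr 1
      by_cases h : v = "all" <;> simp [pvExp, h]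

-- folding the membership-append step equals appending the nub of the not-yet-seen part
theorem pvFold_eq_nub (xs : List String) (acc : List String) :
    xs.foldl (fun r x => if x ∈ r then r else r ++ [x]) acc
      = acc ++ pvNub (xs.filter (fun x => x ∉ acc)) := by
  induction xs generalizing acc with
  | nil => simp [pvNub]
  | cons x xs ih =>
      simp only [List.foldl_cons, List.filter_cons]
      by_cases hx : x ∈ acc
      · rw [if_pos hx, ih]
        simp [hx]
      · rw [if_neg hx, ih]
        simp only [hx, not_false_iff, decide_true, if_true, pvNub, List.filter_filter,
          List.append_assoc, List.singleton_append]
        congr 2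
        congr 1
        apply List.filter_congr
        intro y _
        by_cases h1 : y ∈ acc <;> by_cases h2 : y = x <;> simp [h1, h2, hx]

-- ===== VERDICT (by name: the statement is the Claim_ definition above) =====
theorem resolve_tiers_py_spec : Claim_equal_resolve_tiers_py := by
  intro values _
  unfold Spec_resolve_tiers_py resolve_tiers_py resolve_tiers_py_alt
  match values with
  | none => rfl
  | some vs =>
      by_cases h : vs = []
      · simp [h]
      · simp only [h, if_false]
        rw [pvLoopA_eq, pvFold_eq_nub]
        simp only [List.not_mem_nil, not_false_iff, decide_true, List.filter_true, List.nil_append]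
        rfl
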